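-- pv_equiv track=rewrite | github.com/ELilyasamrani/QuickHull | functions.py | findLandR
-- ===== SOURCE A (Python) =====
-- def findLandR(E,i):
--     max,min = E[0],E[0]
--     for p in E:
--         if p[i]>max[i]:
--             max = p
--         elif p[i]<min[i]:
--             min = p
--     return max,min
-- ===== SOURCE B (Python) =====
-- def findLandR(E, i):
--     # Back-to-front recursive decomposition: the first-occurring extremal of a
--     # non-empty list is the head unless the tail's extremal is strictly better.
--     def ext(lst, better):
--         if len(lst) <= 1:
--             return lst[0]
--         best = ext(lst[1:], better)
--         return best if better(best[i], lst[0][i]) else lst[0]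
--     return ext(E, lambda a, b: a > b), ext(E, lambda a, b: a < b)
-- ===== Notes on version B (the rewrite author's own statement) =====
-- stated objective: alternative
-- what changed: Replaces A's single left-to-right pass carrying a coupled (max,min) pair with an if/elif chain by a recursive back-to-front decomposition: a helper computes the first-occurring extremal (head unless the tail's extremal is strictly better), called once with > and once with <; correctness relies on the invariant min[i] <= max[i], which makes A's elif independent of the max branch.
import Mathlib
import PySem

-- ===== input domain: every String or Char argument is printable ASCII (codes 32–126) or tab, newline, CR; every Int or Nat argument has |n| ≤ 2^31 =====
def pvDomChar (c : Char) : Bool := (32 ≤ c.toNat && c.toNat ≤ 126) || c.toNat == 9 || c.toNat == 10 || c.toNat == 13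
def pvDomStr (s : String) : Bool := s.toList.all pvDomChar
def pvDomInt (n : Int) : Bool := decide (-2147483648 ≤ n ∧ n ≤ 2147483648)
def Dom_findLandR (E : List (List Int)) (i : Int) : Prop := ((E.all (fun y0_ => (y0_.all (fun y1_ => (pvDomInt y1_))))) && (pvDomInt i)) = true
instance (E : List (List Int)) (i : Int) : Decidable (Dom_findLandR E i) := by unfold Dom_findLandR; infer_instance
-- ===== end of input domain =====

-- B replaces A's single coupled (max,min) left pass with a recursive back-to-front
-- extremal helper called twice (once with >, once with <); objective: alternative.


-- ===== PORT A =====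
-- one pass carrying the pair (max, min); p[i] via pyGetD, total under Pre_ (index in range)
def findLandR (E : List (List Int)) (i : Int) : List Int × List Int :=
  E.foldl (fun s p =>
    if PySem.List.pyGetD p i 0 > PySem.List.pyGetD s.1 i 0 then (p, s.2)
    else if PySem.List.pyGetD p i 0 < PySem.List.pyGetD s.2 i 0 then (s.1, p)
    else s) (E.headD [], E.headD [])

-- ===== PORT B =====
-- B's helper ext: first-occurring extremal of a non-empty list, computed back-to-front:
-- the head, unless the tail's extremal is strictly 'better'.  On [] Python raises
-- IndexError (lst[0]); the [] equation is unreachable under Pre_.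
def extPt (i : Int) (better : Int → Int → Bool) : List (List Int) → List Int
  | [] => []
  | [p] => p
  | p :: q :: rest =>
    let best := extPt i better (q :: rest)
    if better (PySem.List.pyGetD best i 0) (PySem.List.pyGetD p i 0) then best else p

def findLandR_alt (E : List (List Int)) (i : Int) : List Int × List Int :=
  (extPt i (fun a b => a > b) E, extPt i (fun a b => a < b) E)

-- ===== PRECONDITION & SPEC =====
-- Pre_ excludes exactly the inputs where Python A raises IndexError: empty E, or some row
-- without a valid index i (Python wraps negative indices).
def Pre_findLandR (E : List (List Int)) (i : Int) : Prop :=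
  E ≠ [] ∧ ∀ p ∈ E, PySem.Raise.InRange p.length i
instance (E : List (List Int)) (i : Int) : Decidable (Pre_findLandR E i) := by unfold Pre_findLandR; infer_instance
def pvWitness_findLandR : List (List Int) × Int := ([[1, 2], [3, 0], [2, 5]], 1)
def Spec_findLandR (E : List (List Int)) (i : Int) (out : List Int × List Int) : Prop := out = findLandR_alt E i
instance (E : List (List Int)) (i : Int) (out : List Int × List Int) : Decidable (Spec_findLandR E i out) := by unfold Spec_findLandR; infer_instance

-- ===== CLAIM (what is proved, stated in full; the proofs are below) =====
def Claim_equal_findLandR : Prop := ∀ (E : List (List Int)) (i : Int), Dom_findLandR E i → Pre_findLandR E i → Spec_findLandR E i (findLandR E i)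

-- ===== LEMMAS AND PROOFS =====

-- A's coupled fold splits into two independent scans while the running min's
-- coordinate stays ≤ the running max's coordinate.
theorem findLandR_fold_split (i : Int) (E : List (List Int)) :
    ∀ (mx mn : List Int), PySem.List.pyGetD mn i 0 ≤ PySem.List.pyGetD mx i 0 →
    E.foldl (fun s p =>
      if PySem.List.pyGetD p i 0 > PySem.List.pyGetD s.1 i 0 then (p, s.2)
      else if PySem.List.pyGetD p i 0 < PySem.List.pyGetD s.2 i 0 then (s.1, p)
      else s) (mx, mn)
    = (E.foldl (fun cur p =>
        if PySem.List.pyGetD p i 0 > PySem.List.pyGetD cur i 0 then p else cur) mx,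
       E.foldl (fun cur p =>
        if PySem.List.pyGetD p i 0 < PySem.List.pyGetD cur i 0 then p else cur) mn) := by
  induction E with
  | nil => intro mx mn _; rfl
  | cons p E ih =>
    intro mx mn h
    simp only [List.foldl_cons]
    by_cases h1 : PySem.List.pyGetD p i 0 > PySem.List.pyGetD mx i 0
    · rw [if_pos h1, if_pos h1, if_neg (by omega)]
      exact ih p mn (by omega)
    · rw [if_neg h1, if_neg h1]
      by_cases h2 : PySem.List.pyGetD p i 0 < PySem.List.pyGetD mn i 0
      · rw [if_pos h2, if_pos h2]
        exact ih mx p (by omega)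
      · rw [if_neg h2, if_neg h2]
        exact ih mx mn h

-- left max scan from an arbitrary start = compare the start against extPt
theorem foldl_max_extPt (i : Int) : ∀ (E : List (List Int)) (mx : List Int), E ≠ [] →
    E.foldl (fun cur p =>
      if PySem.List.pyGetD p i 0 > PySem.List.pyGetD cur i 0 then p else cur) mx
    = if PySem.List.pyGetD (extPt i (fun a b => a > b) E) i 0 > PySem.List.pyGetD mx i 0
      then extPt i (fun a b => a > b) E else mx := by
  intro E
  induction E with
  | nil => intro mx h; exact absurd rfl h
  | cons p E ih =>
    intro mx _
    cases E with
    | nil => simp [extPt]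
    | cons q rest =>
      rw [List.foldl_cons]
      rw [ih (if PySem.List.pyGetD p i 0 > PySem.List.pyGetD mx i 0 then p else mx) (by simp)]
      simp only [extPt, decide_eq_true_eq]
      split_ifs <;> first | rfl | omega

theorem foldl_min_extPt (i : Int) : ∀ (E : List (List Int)) (mn : List Int), E ≠ [] →
    E.foldl (fun cur p =>
      if PySem.List.pyGetD p i 0 < PySem.List.pyGetD cur i 0 then p else cur) mn
    = if PySem.List.pyGetD (extPt i (fun a b => a < b) E) i 0 < PySem.List.pyGetD mn i 0
      then extPt i (fun a b => a < b) E else mn := by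
  intro E
  induction E with
  | nil => intro mn h; exact absurd rfl h
  | cons p E ih =>
    intro mn _
    cases E with
    | nil => simp [extPt]
    | cons q rest =>
      rw [List.foldl_cons]
      rw [ih (if PySem.List.pyGetD p i 0 < PySem.List.pyGetD mn i 0 then p else mn) (by simp)]
      simp only [extPt, decide_eq_true_eq]
      split_ifs <;> first | rfl | omega

-- ===== VERDICT (by name: the statement is the Claim_ definition above) =====
theorem findLandR_spec : Claim_equal_findLandR := by
  intro E i _ hpre
  unfold Spec_findLandR findLandR findLandR_alt
  rw [findLandR_fold_split i E _ _ le_rfl]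
  obtain ⟨hne, -⟩ := hpre
  rw [foldl_max_extPt i E _ hne, foldl_min_extPt i E _ hne]
  cases E with
  | nil => exact absurd rfl hne
  | cons p rest =>
    simp only [List.headD_cons, Prod.mk.injEq]
    constructor
    · cases rest with
      | nil => simp [extPt]
      | cons q t => simp only [extPt, decide_eq_true_eq]; split_ifs <;> first | rfl | omega
    · cases rest with
      | nil => simp [extPt]
      | cons q t => simp only [extPt, decide_eq_true_eq]; split_ifs <;> first | rfl | omega
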